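-- pv_equiv track=rewrite | github.com/sluglife1414-ux/Court_reporting_demo | create_test_depo.py | find_testimony_start
-- ===== SOURCE A (Python) =====
-- TESTIMONY_CONTENT_TRIGGERS = (
--     'THE VIDEOGRAPHER:',
--     'THE COURT REPORTER:',
--     'THE WITNESS:',
-- )
--
-- def find_testimony_start(lines):
--     """
--     Return the line index where testimony content begins.
--     Strategy: find S T I P U L A T I O N, then find first actual speech line.
--     Everything before that index = headers to keep intact.
--     """
--     in_stip = False
--     for i, line in enumerate(lines):
--         s = line.strip()
--         if 'S T I P U L A T I O N' in s:
--             in_stip = True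
--         if in_stip:
--             for trigger in TESTIMONY_CONTENT_TRIGGERS:
--                 if s.startswith(trigger):
--                     return i
--     # Fallback: return 80% of file start (testimony likely started)
--     return len(lines) * 8 // 10
-- ===== SOURCE B (Python) =====
-- TESTIMONY_CONTENT_TRIGGERS = (
--     'THE VIDEOGRAPHER:',
--     'THE COURT REPORTER:',
--     'THE WITNESS:',
-- )
--
-- def find_testimony_start(lines):
--     fallback = len(lines) * 8 // 10
--     stips = [i for i, l in enumerate(lines) if 'S T I P U L A T I O N' in l.strip()]
--     trigs = [i for i, l in enumerate(lines) if l.strip().startswith(TESTIMONY_CONTENT_TRIGGERS)]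
--     if not stips:
--         return fallback
--     cands = [t for t in trigs if t >= stips[0]]
--     return cands[0] if cands else fallback
-- ===== Notes on version B (the rewrite author's own statement) =====
-- stated objective: alternative
-- what changed: Instead of a stateful scan, B materialises the full index lists of stipulation lines and trigger lines in two independent passes, then answers by pure index arithmetic: the first trigger index at or after the first stipulation index, with the same 80% fallback.
import Mathlib
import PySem

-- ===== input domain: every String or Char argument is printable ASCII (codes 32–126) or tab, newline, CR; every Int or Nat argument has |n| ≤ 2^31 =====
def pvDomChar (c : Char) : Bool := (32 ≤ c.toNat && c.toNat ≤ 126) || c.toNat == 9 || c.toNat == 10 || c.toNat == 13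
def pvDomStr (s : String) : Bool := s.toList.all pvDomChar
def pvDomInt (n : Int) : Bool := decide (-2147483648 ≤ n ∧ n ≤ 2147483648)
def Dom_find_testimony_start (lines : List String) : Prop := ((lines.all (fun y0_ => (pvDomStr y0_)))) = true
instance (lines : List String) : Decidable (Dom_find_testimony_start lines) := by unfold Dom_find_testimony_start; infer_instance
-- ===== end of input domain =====

-- B replaces A's stateful scan by two independent index-collection passes (all stipulation
-- indices, all trigger indices) followed by pure index arithmetic; return values proved equal.

-- ===== PORT A =====
-- A's loop: enumerate with the in_stip flag; inner loop over the three triggers is the disjunction.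
def pvGoA (fallback : Int) : List String → Int → Bool → Int
  | [], _, _ => fallback
  | l :: rest, i, inStip =>
    let s := PySem.Str.strip l
    let inStip' := if PySem.Str.isIn "S T I P U L A T I O N" s then true else inStip
    if inStip' &&
        (PySem.Str.startswith s "THE VIDEOGRAPHER:" ||
         PySem.Str.startswith s "THE COURT REPORTER:" ||
         PySem.Str.startswith s "THE WITNESS:") then i
    else pvGoA fallback rest (i + 1) inStip'

def find_testimony_start (lines : List String) : Int :=
  pvGoA (PySem.Int.floordiv ((lines.length : Int) * 8) 10) lines 0 false

-- ===== PORT B =====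
def pvHasStip (l : String) : Bool :=
  PySem.Str.isIn "S T I P U L A T I O N" (PySem.Str.strip l)

def pvIsTrigger (l : String) : Bool :=
  let s := PySem.Str.strip l
  PySem.Str.startswith s "THE VIDEOGRAPHER:" ||
  PySem.Str.startswith s "THE COURT REPORTER:" ||
  PySem.Str.startswith s "THE WITNESS:"

-- the two comprehensions over enumerate(lines), then arithmetic on the index lists
def find_testimony_start_alt (lines : List String) : Int :=
  let fallback := PySem.Int.floordiv ((lines.length : Int) * 8) 10
  let stips := ((PySem.List.enumerate lines).filter (fun p => pvHasStip p.2)).map (·.1)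
  let trigs := ((PySem.List.enumerate lines).filter (fun p => pvIsTrigger p.2)).map (·.1)
  match stips with
  | [] => fallback
  | s :: _ =>
    match trigs.filter (fun t => s ≤ t) with
    | [] => fallback
    | c :: _ => c

-- ===== PRECONDITION & SPEC =====
def Spec_find_testimony_start (lines : List String) (out : Int) : Prop := out = find_testimony_start_alt lines
instance (lines : List String) (out : Int) : Decidable (Spec_find_testimony_start lines out) := by unfold Spec_find_testimony_start; infer_instance

-- ===== CLAIM (what is proved, stated in full; the proofs are below) =====
def Claim_equal_find_testimony_start : Prop := ∀ (lines : List String), Dom_find_testimony_start lines → Spec_find_testimony_start lines (find_testimony_start lines)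

-- ===== LEMMAS AND PROOFS =====

-- The one-step unfolding of A's loop, with the two tests named.
theorem pvGoA_cons (fb : Int) (l : String) (tl : List String) (i : Int) (b : Bool) :
    pvGoA fb (l :: tl) i b =
      (if (pvHasStip l || b) && pvIsTrigger l then i
       else pvGoA fb tl (i + 1) (pvHasStip l || b)) := by
  simp only [pvGoA, pvHasStip, pvIsTrigger]
  rcases hs : PySem.Str.isIn "S T I P U L A T I O N" (PySem.Str.strip l) with _ | _ <;>
    cases b <;> simp

-- Once in_stip is true, A's loop is a plain first-trigger scan.
theorem pvGoA_true (fb : Int) : ∀ (rest : List String) (i : Int),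
    pvGoA fb rest i true =
      match rest.findIdx? pvIsTrigger with
      | some j => i + (j : Int)
      | none => fb := by
  intro rest
  induction rest with
  | nil => intro i; simp [pvGoA]
  | cons l tl ih =>
    intro i
    rw [pvGoA_cons]
    simp only [Bool.or_true, Bool.true_and]
    rw [ih (i + 1), List.findIdx?_cons]
    by_cases h : pvIsTrigger l
    · simp [h]
    · simp only [h, Bool.false_eq_true, not_false_iff, if_neg]
      generalize tl.findIdx? pvIsTrigger = o
      cases o with
      | none => simp
      | some j => simp; ring

-- With in_stip false, A's loop is the stip-then-trigger computation.
theorem pvGoA_false (fb : Int) : ∀ (rest : List String) (i : Int),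
    pvGoA fb rest i false =
      match rest.findIdx? pvHasStip with
      | none => fb
      | some k =>
        match (rest.drop k).findIdx? pvIsTrigger with
        | some j => i + (k : Int) + (j : Int)
        | none => fb := by
  intro rest
  induction rest with
  | nil => intro i; simp [pvGoA]
  | cons l tl ih =>
    intro i
    rw [pvGoA_cons, List.findIdx?_cons]
    by_cases hs : pvHasStip l
    · simp only [hs, Bool.true_or, Bool.true_and, if_pos]
      by_cases ht : pvIsTrigger l
      · simp [ht, List.findIdx?_cons]
      · simp only [ht, Bool.false_eq_true, not_false_iff, if_neg]
        rw [pvGoA_true]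
        simp only [List.drop_zero, List.findIdx?_cons, ht, Bool.false_eq_true, not_false_iff,
          if_neg, Nat.cast_zero, add_zero]
        generalize tl.findIdx? pvIsTrigger = o
        cases o with
        | none => simp
        | some j => simp; ring
    · simp only [hs, Bool.false_or, Bool.false_eq_true, not_false_iff, if_neg]
      rw [ih (i + 1)]
      cases b : pvIsTrigger l <;> simp only [Bool.and_false, Bool.and_true]
      all_goals {
        generalize tl.findIdx? pvHasStip = o
        cases o with
        | none => simp
        | some k =>
          simp only [Option.map_some, List.drop_succ_cons]
          generalize (tl.drop k).findIdx? pvIsTrigger = o2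
          cases o2 with
          | none => simp
          | some k => simp; ring
      }

-- Head of an index-comprehension list = findIdx?, shifted by the enumeration start.
theorem pvIdxHead (q : String → Bool) : ∀ (xs : List String) (k : Int),
    (((PySem.List.enumerate xs k).filter (fun p => q p.2)).map (·.1)).head? =
      (xs.findIdx? q).map (fun (j : Nat) => k + (j : Int)) := by
  intro xs
  induction xs with
  | nil => intro k; simp [PySem.List.enumerate_nil]
  | cons x tl ih =>
    intro k
    rw [PySem.List.enumerate_cons, List.filter_cons, List.findIdx?_cons]
    by_cases h : q x
    · simp [h]
    · simp only [h, Bool.false_eq_true, not_false_iff, if_neg]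
      rw [ih (k + 1)]
      generalize tl.findIdx? q = o
      cases o with
      | none => simp
      | some j => simp; ring

-- Every index produced by enumerate xs k lies in [k, k + xs.length).
theorem pvEnumIdx_bounds (xs : List String) (k : Int) (p : Int × String)
    (h : p ∈ PySem.List.enumerate xs k) : k ≤ p.1 ∧ p.1 < k + (xs.length : Int) := by
  rcases (PySem.List.mem_enumerate_iff _ _ _).mp h with ⟨j, hj, rfl⟩
  refine ⟨by simp, by simp; omega⟩

-- Filtering the trigger-index list to ≥ s is the trigger-index list of the suffix from s.
theorem pvTrigsSuffix (lines : List String) (s : Nat) (hs : s ≤ lines.length) :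
    ((((PySem.List.enumerate lines).filter (fun p => pvIsTrigger p.2)).map (·.1)).filter
        (fun t => (s : Int) ≤ t)) =
      (((PySem.List.enumerate (lines.drop s) (s : Int)).filter (fun p => pvIsTrigger p.2)).map (·.1)) := by
  rw [List.filter_map, List.filter_filter]
  simp only [Function.comp_def]
  have hsplit : lines = lines.take s ++ lines.drop s := (List.take_append_drop s lines).symm
  have hlen : (lines.take s).length = s := List.length_take_of_le hs
  conv_lhs => rw [hsplit]
  rw [PySem.List.enumerate_append, List.filter_append]
  have h1 : ((PySem.List.enumerate (lines.take s) 0).filter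
      (fun p => (s : Int) ≤ p.1 && pvIsTrigger p.2)) = [] := by
    rw [List.filter_eq_nil_iff]
    intro p hp
    have := pvEnumIdx_bounds _ _ _ hp
    rw [hlen] at this
    simp only [Bool.and_eq_true, decide_eq_true_eq, not_and]
    intro hle
    omega
  have h2 : ((PySem.List.enumerate (lines.drop s) (0 + (lines.take s).length : Int)).filter
      (fun p => (s : Int) ≤ p.1 && pvIsTrigger p.2)) =
      ((PySem.List.enumerate (lines.drop s) (s : Int)).filter (fun p => pvIsTrigger p.2)) := by
    rw [hlen]
    norm_num
    apply List.filter_congr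
    intro p hp
    have hb := pvEnumIdx_bounds _ _ _ hp
    have hd : decide ((s : Int) ≤ p.1) = true := by
      simp only [decide_eq_true_eq]; omega
    rw [hd, Bool.true_and]
  rw [h1, h2]
  simp

-- ===== VERDICT (by name: the statement is the Claim_ definition above) =====
theorem find_testimony_start_spec : Claim_equal_find_testimony_start := by
  intro lines _
  unfold Spec_find_testimony_start find_testimony_start find_testimony_start_alt
  rw [pvGoA_false]
  have hstip := pvIdxHead pvHasStip lines 0
  cases h : lines.findIdx? pvHasStip with
  | none =>
    rw [h, Option.map_none] at hstip
    rw [List.head?_eq_none_iff.mp hstip]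
  | some s =>
    rw [h, Option.map_some, zero_add] at hstip
    have hsle : s ≤ lines.length := by
      have := List.findIdx?_eq_some_iff_findIdx_eq.mp h
      omega
    cases hl : (((PySem.List.enumerate lines).filter (fun p => pvHasStip p.2)).map (·.1)) with
    | nil => rw [hl] at hstip; exact absurd hstip (by simp)
    | cons a tl =>
      rw [hl] at hstip
      simp only [List.head?_cons, Option.some.injEq] at hstip
      subst hstip
      dsimp only
      have htrig := pvTrigsSuffix lines s hsle
      have hhead := pvIdxHead pvIsTrigger (lines.drop s) (s : Int)
      cases hd : (lines.drop s).findIdx? pvIsTrigger with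
      | none =>
        rw [hd, Option.map_none] at hhead
        rw [htrig, List.head?_eq_none_iff.mp hhead]
      | some j =>
        rw [hd, Option.map_some] at hhead
        rw [htrig]
        cases hl2 : (((PySem.List.enumerate (lines.drop s) (s : Int)).filter
            (fun p => pvIsTrigger p.2)).map (·.1)) with
        | nil => rw [hl2] at hhead; exact absurd hhead (by simp)
        | cons c tl2 =>
          rw [hl2] at hhead
          simp only [List.head?_cons, Option.some.injEq] at hhead
          subst hhead
          simp only [zero_add]
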